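-- pv_equiv track=rewrite | github.com/xiaohuanlin/Algorithms | Leetcode/2645. Minimum Additions to Make Valid String.py | addMinimum
-- ===== SOURCE A (Python) =====
-- def addMinimum(word: str) -> int:
--     start = 0
--     res = 0
--     while start < len(word):
--         s = word[start:start + 3]
--         if s == 'abc':
--             start += 3
--         elif s[:2] == 'aa' or s[:2] == 'ba' or s[:2] == 'bb' or s[:1] == 'c':
--             res += 2
--             start += 1
--         elif s[:2] == 'ac' or s[:2] == 'ab':
--             res += 1
--             start += 2
--         elif s[:2] == 'bc':
--             res += 1
--             start += 2
--         elif len(s) == 1: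
--             res += 2
--             start += 1
--     return res
-- ===== SOURCE B (Python) =====
-- def addMinimum(word: str) -> int:
--     # Count increasing runs; each run fits in one "abc" block, so answer = 3*runs - len(word).
--     if not word:
--         return 0
--     groups = 1
--     for i in range(1, len(word)):
--         if word[i] <= word[i - 1]:
--             groups += 1
--     return 3 * groups - len(word)
-- ===== Notes on version B (the rewrite author's own statement) =====
-- stated objective: simpler
-- what changed: Replaces A's greedy matching of 'abc' prefixes (advancing 1-3 chars through a five-branch case table) by a single pass counting increasing runs and the closed form 3*runs - len(word).
-- outside the precondition, e.g. on addMinimum('abx'): A returns 3, B returns 0; on addMinimum('ax'): A does not finish within the time limit, B returns 1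
import Mathlib
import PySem

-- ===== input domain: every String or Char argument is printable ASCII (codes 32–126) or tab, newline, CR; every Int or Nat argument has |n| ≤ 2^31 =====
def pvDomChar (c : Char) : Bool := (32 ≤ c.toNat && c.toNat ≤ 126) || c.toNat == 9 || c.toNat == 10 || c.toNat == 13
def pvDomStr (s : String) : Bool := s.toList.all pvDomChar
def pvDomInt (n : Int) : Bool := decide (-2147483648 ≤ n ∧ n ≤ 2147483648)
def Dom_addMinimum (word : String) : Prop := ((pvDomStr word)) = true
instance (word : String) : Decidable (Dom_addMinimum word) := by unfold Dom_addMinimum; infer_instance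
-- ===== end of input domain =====

-- B replaces A's greedy 'abc'-prefix matching by one pass counting increasing runs
-- and the closed form 3*runs - len(word); objective: simpler.

-- ===== PORT A =====
-- A's while loop over 'start' becomes recursion on the remaining suffix l = word[start:];
-- s = word[start:start+3] is l.take 3 (slice with nonnegative bounds, exact here).
-- In the branch where no condition of A fires (first char outside 'abc' with ≥ 2 chars
-- remaining) the Python loop never terminates; the port returns res there — outside Pre_.
def aLoop : List Char → Int → Int
  | [], res => res
  | l@(_ :: _), res =>
    let s := l.take 3
    if s = ['a', 'b', 'c'] then aLoop (l.drop 3) res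
    else if s.take 2 = ['a', 'a'] ∨ s.take 2 = ['b', 'a'] ∨ s.take 2 = ['b', 'b'] ∨ s.take 1 = ['c'] then
      aLoop (l.drop 1) (res + 2)
    else if s.take 2 = ['a', 'c'] ∨ s.take 2 = ['a', 'b'] then aLoop (l.drop 2) (res + 1)
    else if s.take 2 = ['b', 'c'] then aLoop (l.drop 2) (res + 1)
    else if s.length = 1 then aLoop (l.drop 1) (res + 2)
    else res
  termination_by l _ => l.length
  decreasing_by all_goals simp_all [List.length_drop]

def addMinimum (word : String) : Int := aLoop word.toList 0

-- ===== PORT B =====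
-- Source B's for-loop 'for i in range(1, len(word)): if word[i] <= word[i-1]: groups += 1'
-- as recursion carrying the previous character.
def bCount : Char → List Char → Int
  | _, [] => 0
  | prev, c :: t => (if c ≤ prev then 1 else 0) + bCount c t

def addMinimum_alt (word : String) : Int :=
  match word.toList with
  | [] => 0
  | c :: t => 3 * (1 + bCount c t) - (word.toList.length : Int)

-- ===== PRECONDITION & SPEC =====
-- Pre_ excludes strings containing a character other than a, b, c: on most of them A's
-- while loop never terminates (no branch advances 'start'), and where a stray character is
-- reached as the final remaining character A returns an accidental res+2 that nothing in
-- the abc-repetition task specifies.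
def Pre_addMinimum (word : String) : Prop :=
  (word.toList.all (fun c => c == 'a' || c == 'b' || c == 'c')) = true
instance (word : String) : Decidable (Pre_addMinimum word) := by
  unfold Pre_addMinimum; infer_instance

def pvWitness_addMinimum : String := "bacabcc"

def Spec_addMinimum (word : String) (out : Int) : Prop := out = addMinimum_alt word
instance (word : String) (out : Int) : Decidable (Spec_addMinimum word out) := by unfold Spec_addMinimum; infer_instance

-- ===== CLAIM (what is proved, stated in full; the proofs are below) =====
def Claim_equal_addMinimum : Prop := ∀ (word : String), Dom_addMinimum word → Pre_addMinimum word → Spec_addMinimum word (addMinimum word)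

-- ===== LEMMAS AND PROOFS =====

-- B's value on a character list.
def bVal : List Char → Int
  | [] => 0
  | c :: t => 3 * (1 + bCount c t) - ((c :: t).length : Int)

theorem addMinimum_alt_eq (word : String) : addMinimum_alt word = bVal word.toList := by
  unfold addMinimum_alt bVal
  cases word.toList <;> simp

def okChar (c : Char) : Prop := c = 'a' ∨ c = 'b' ∨ c = 'c'

theorem main_lemma : ∀ n (l : List Char), l.length ≤ n → (∀ c ∈ l, okChar c) →
    ∀ res, aLoop l res = res + bVal l := by
  intro n
  induction n with
  | zero =>
    intro l hl _ res
    have : l = [] := by cases l <;> simp_all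
    subst this; simp [aLoop, bVal]
  | succ n ih =>
    intro l hl hok res
    match l with
    | [] => simp [aLoop, bVal]
    | [c1] =>
      have h1 : okChar c1 := hok c1 (by simp)
      rcases h1 with rfl | rfl | rfl <;> simp [aLoop, bVal, bCount]
    | c1 :: c2 :: t =>
      have h1 : okChar c1 := hok c1 (by simp)
      have h2 : okChar c2 := hok c2 (by simp)
      have hokt : ∀ c ∈ t, okChar c := fun c hc => hok c (by simp [hc])
      have hok2 : ∀ c ∈ c2 :: t, okChar c := fun c hc => hok c (by simp at hc ⊢; tauto)
      have hlt : t.length ≤ n := by simp at hl; omega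
      have hlt2 : (c2 :: t).length ≤ n := by simp at hl ⊢; omega
      have ihc2 := ih (c2 :: t) hlt2 hok2
      have iht := ih t hlt hokt
      rcases h1 with rfl | rfl | rfl <;> rcases h2 with rfl | rfl | rfl
      · -- "aa…" : +2, advance 1
        rw [aLoop]; simp [ihc2, bVal, bCount]; ring
      · -- "ab…" : either "abc" (advance 3) or advance 2
        match t with
        | [] => rw [aLoop]; simp [aLoop, bVal, bCount]
        | c3 :: t' =>
          have h3 : okChar c3 := hokt c3 (by simp)
          have hokt' : ∀ c ∈ t', okChar c := fun c hc => hokt c (by simp [hc])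
          have hlt' : t'.length ≤ n := by simp at hl; omega
          have iht' := ih t' hlt' hokt'
          rcases h3 with rfl | rfl | rfl
          · rw [aLoop]; simp [iht, bVal, bCount]; ring
          · rw [aLoop]; simp [iht, bVal, bCount]; ring
          · -- "abc" : advance 3
            rw [aLoop]
            cases t' with
            | nil => simp [aLoop, bVal, bCount]
            | cons c4 t'' =>
              have hle : c4 ≤ 'c' := by
                rcases hokt' c4 (by simp) with rfl | rfl | rfl <;> decide
              simp [iht', bVal, bCount, hle]; ring
      · -- "ac…" : +1, advance 2
        rw [aLoop]
        cases t with
        | nil => simp [aLoop, bVal, bCount]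
        | cons c3 t' =>
          have hle : c3 ≤ 'c' := by
            rcases hokt c3 (by simp) with rfl | rfl | rfl <;> decide
          simp [iht, bVal, bCount, hle]; ring
      · -- "ba…"
        rw [aLoop]; simp [ihc2, bVal, bCount]; ring
      · -- "bb…"
        rw [aLoop]; simp [ihc2, bVal, bCount]; ring
      · -- "bc…" : +1, advance 2
        rw [aLoop]
        cases t with
        | nil => simp [aLoop, bVal, bCount]
        | cons c3 t' =>
          have hle : c3 ≤ 'c' := by
            rcases hokt c3 (by simp) with rfl | rfl | rfl <;> decide
          simp [iht, bVal, bCount, hle]; ring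
      · -- "ca…"
        rw [aLoop]; simp [ihc2, bVal, bCount]; ring
      · -- "cb…"
        rw [aLoop]; simp [ihc2, bVal, bCount]; ring
      · -- "cc…"
        rw [aLoop]; simp [ihc2, bVal, bCount]; ring

-- ===== VERDICT (by name: the statement is the Claim_ definition above) =====
theorem addMinimum_spec : Claim_equal_addMinimum := by
  intro word _ hpre
  unfold Pre_addMinimum at hpre
  have hok : ∀ c ∈ word.toList, okChar c := by
    intro c hc
    have := List.all_eq_true.mp hpre c hc
    unfold okChar
    rcases Bool.or_eq_true_iff.mp this with h | h
    · rcases Bool.or_eq_true_iff.mp h with h' | h'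
      · exact Or.inl (by exact beq_iff_eq.mp h')
      · exact Or.inr (Or.inl (beq_iff_eq.mp h'))
    · exact Or.inr (Or.inr (beq_iff_eq.mp h))
  unfold Spec_addMinimum
  rw [addMinimum_alt_eq]
  unfold addMinimum
  rw [main_lemma word.toList.length word.toList le_rfl hok 0]
  simp
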